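-- pv_equiv track=rewrite | github.com/kua-simi-kua/kua_simi | scripts/fork_retro.py | compare_target_forked_commits
-- ===== SOURCE A (Python) =====
-- def compare_target_forked_commits(target_commit_info_list, forked_commit_info_list):
--     common_commits = list()
--     target_commit_info_list_copy = target_commit_info_list.copy()
--     while len(target_commit_info_list_copy) and len(forked_commit_info_list):
--         earliest_target_commit = target_commit_info_list_copy.pop()
--         earliest_forked_commit = forked_commit_info_list.pop()
--         if earliest_target_commit[0] != earliest_forked_commit[0]:
--             target_commit_info_list_copy.append(earliest_target_commit)
--             forked_commit_info_list.append(earliest_forked_commit)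
--             break
--         common_commits.append(earliest_forked_commit)
--
--     if not len(common_commits): # sometimes there are no common commit sha, could be rebased
--         common_commits.append(forked_commit_info_list[-1])
--
--     return len(target_commit_info_list_copy), len(forked_commit_info_list), common_commits[-1]
-- ===== SOURCE B (Python) =====
-- def compare_target_forked_commits(target_commit_info_list, forked_commit_info_list):
--     # Count matching trailing pairs (by commit sha = element [0]) in one pass.
--     n = 0
--     for t, f in zip(reversed(target_commit_info_list), reversed(forked_commit_info_list)):
--         if t[0] != f[0]:
--             break
--         n += 1
--     last_common = forked_commit_info_list[-n] if n else forked_commit_info_list[-1]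
--     if n:
--         # same in-place truncation of the forked list that A performs by popping
--         del forked_commit_info_list[len(forked_commit_info_list) - n:]
--     return len(target_commit_info_list) - n, len(forked_commit_info_list), last_common
-- ===== Notes on version B (the rewrite author's own statement) =====
-- stated objective: simpler
-- what changed: B replaces A's mutating pop/append-restore while-loop over a copied list by a single read-only counting pass over the zipped reversed lists, deriving both lengths and the returned commit arithmetically from the count (the in-place truncation of the forked list is kept).
import Mathlib
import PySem

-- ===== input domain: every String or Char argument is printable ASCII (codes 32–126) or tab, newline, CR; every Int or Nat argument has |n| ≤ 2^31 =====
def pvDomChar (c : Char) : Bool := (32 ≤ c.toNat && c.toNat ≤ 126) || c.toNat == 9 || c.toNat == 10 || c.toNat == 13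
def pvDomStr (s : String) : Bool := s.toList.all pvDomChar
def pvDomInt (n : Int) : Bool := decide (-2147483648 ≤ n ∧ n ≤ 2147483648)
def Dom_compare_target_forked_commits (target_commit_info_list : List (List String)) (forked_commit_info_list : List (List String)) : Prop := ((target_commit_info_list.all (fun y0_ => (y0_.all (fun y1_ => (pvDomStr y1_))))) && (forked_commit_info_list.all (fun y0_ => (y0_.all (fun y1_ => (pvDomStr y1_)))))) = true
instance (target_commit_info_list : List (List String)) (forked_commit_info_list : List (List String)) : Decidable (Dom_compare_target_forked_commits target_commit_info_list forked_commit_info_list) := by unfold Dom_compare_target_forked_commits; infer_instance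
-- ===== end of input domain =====

-- B replaces A's mutating pop/restore while-loop by one read-only counting pass over the
-- zipped reversed lists ("simpler" objective). Both Pythons truncate the forked list in
-- place identically; the equivalence proved here is about the RETURN value.

-- ===== PORT A =====
-- the while-loop: state (target_copy, forked, common_commits); pops = getLast/dropLast
def pvLoopA : List (List String) → List (List String) → List (List String) →
    List (List String) × List (List String) × List (List String)
  | tcopy, forked, common =>
    if h : tcopy ≠ [] ∧ forked ≠ [] then
      let et := tcopy.getLast h.1          -- earliest_target_commit = pop()
      let ef := forked.getLast h.2         -- earliest_forked_commit = pop()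
      let tcopy' := tcopy.dropLast
      let forked' := forked.dropLast
      if et.headD "" ≠ ef.headD "" then    -- [0]; inner lists nonempty inside Pre_
        (tcopy' ++ [et], forked' ++ [ef], common)   -- append back, break
      else
        pvLoopA tcopy' forked' (common ++ [ef])
    else (tcopy, forked, common)
  termination_by tcopy _ _ => tcopy.length
  decreasing_by
    have : tcopy ≠ [] := h.1
    simp [List.length_dropLast]
    cases tcopy with
    | nil => exact absurd rfl this
    | cons a as => simp

def compare_target_forked_commits (target_commit_info_list : List (List String)) (forked_commit_info_list : List (List String)) : Int × Int × List String :=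
  let r := pvLoopA target_commit_info_list forked_commit_info_list []
  let tcopy := r.1
  let forked := r.2.1
  let common := r.2.2
  let common := if common.length = 0 then common ++ [forked.getLastD []] else common
  ((tcopy.length : Int), (forked.length : Int), common.getLastD [])

-- ===== PORT B =====
-- n = count of matching trailing pairs, walked over the two reversed lists
def pvCountB : List (List String) → List (List String) → Nat
  | t :: ts, f :: fs => if t.headD "" ≠ f.headD "" then 0 else pvCountB ts fs + 1
  | _, _ => 0

def compare_target_forked_commits_alt (target_commit_info_list : List (List String)) (forked_commit_info_list : List (List String)) : Int × Int × List String :=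
  let n := pvCountB target_commit_info_list.reverse forked_commit_info_list.reverse
  let last_common :=
    if n ≠ 0 then (PySem.List.pyGet? forked_commit_info_list (-(n : Int))).getD []
    else forked_commit_info_list.getLastD []   -- forked[-1]; nonempty inside Pre_
  ((target_commit_info_list.length : Int) - n,
   (forked_commit_info_list.length : Int) - n, last_common)

-- ===== PRECONDITION & SPEC =====
-- Pre_ excludes exactly the inputs on which A raises IndexError: an empty forked list
-- (forked[-1] fails), or a trailing pair containing an empty commit-info entry that the
-- matching walk reaches, i.e. with no genuine sha mismatch at a strictly earlier trailing pair.
def Pre_compare_target_forked_commits (target_commit_info_list : List (List String)) (forked_commit_info_list : List (List String)) : Prop :=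
  forked_commit_info_list ≠ [] ∧
  ∀ i < min target_commit_info_list.length forked_commit_info_list.length,
    (target_commit_info_list.reverse.getD i [] = [] ∨ forked_commit_info_list.reverse.getD i [] = []) →
    ∃ j < i, target_commit_info_list.reverse.getD j [] ≠ [] ∧ forked_commit_info_list.reverse.getD j [] ≠ [] ∧
      (target_commit_info_list.reverse.getD j []).headD "" ≠ (forked_commit_info_list.reverse.getD j []).headD ""
instance (target_commit_info_list : List (List String)) (forked_commit_info_list : List (List String)) : Decidable (Pre_compare_target_forked_commits target_commit_info_list forked_commit_info_list) := by unfold Pre_compare_target_forked_commits; infer_instance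

def pvWitness_compare_target_forked_commits : List (List String) × List (List String) :=
  ([["a"], ["b"]], [["c"], ["b"]])

def Spec_compare_target_forked_commits (target_commit_info_list : List (List String)) (forked_commit_info_list : List (List String)) (out : Int × Int × List String) : Prop := out = compare_target_forked_commits_alt target_commit_info_list forked_commit_info_list
instance (target_commit_info_list : List (List String)) (forked_commit_info_list : List (List String)) (out : Int × Int × List String) : Decidable (Spec_compare_target_forked_commits target_commit_info_list forked_commit_info_list out) := by unfold Spec_compare_target_forked_commits; infer_instance

-- ===== CLAIM (what is proved, stated in full; the proofs are below) =====
def Claim_equal_compare_target_forked_commits : Prop := ∀ (target_commit_info_list : List (List String)) (forked_commit_info_list : List (List String)), Dom_compare_target_forked_commits target_commit_info_list forked_commit_info_list → Pre_compare_target_forked_commits target_commit_info_list forked_commit_info_list → Spec_compare_target_forked_commits target_commit_info_list forked_commit_info_list (compare_target_forked_commits target_commit_info_list forked_commit_info_list)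

-- ===== LEMMAS AND PROOFS =====

theorem pvCountB_le_left (a b : List (List String)) : pvCountB a b ≤ a.length := by
  induction a generalizing b with
  | nil => simp [pvCountB]
  | cons x xs ih =>
    cases b with
    | nil => simp [pvCountB]
    | cons y ys =>
      simp only [pvCountB]
      split
      · simp
      · have := ih ys; simp; omega

theorem pvCountB_le_right (a b : List (List String)) : pvCountB a b ≤ b.length := by
  induction a generalizing b with
  | nil => simp [pvCountB]
  | cons x xs ih =>
    cases b with
    | nil => simp [pvCountB]
    | cons y ys =>
      simp only [pvCountB]
      split
      · simp
      · have := ih ys; simp; omega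

theorem pvLoopA_eq (tcopy forked common : List (List String)) :
    pvLoopA tcopy forked common =
      (tcopy.take (tcopy.length - pvCountB tcopy.reverse forked.reverse),
       forked.take (forked.length - pvCountB tcopy.reverse forked.reverse),
       common ++ forked.reverse.take (pvCountB tcopy.reverse forked.reverse)) := by
  fun_induction pvLoopA tcopy forked common with
  | case1 tcopy forked common h et ef tcopy' forked' hne =>
    -- mismatch: n = 0 and the popped elements are appended back
    have ht : tcopy.dropLast ++ [tcopy.getLast h.1] = tcopy := List.dropLast_concat_getLast h.1
    have hf : forked.dropLast ++ [forked.getLast h.2] = forked := List.dropLast_concat_getLast h.2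
    have htr : tcopy.reverse = tcopy.getLast h.1 :: tcopy.dropLast.reverse := by
      conv_lhs => rw [← ht]
      simp
    have hfr : forked.reverse = forked.getLast h.2 :: forked.dropLast.reverse := by
      conv_lhs => rw [← hf]
      simp
    have hn : pvCountB tcopy.reverse forked.reverse = 0 := by
      rw [htr, hfr]; simp only [pvCountB]; rw [if_pos hne]
    simp [et, ef, tcopy', forked', hn, ht, hf]
  | case2 tcopy forked common h et ef tcopy' forked' hne ih =>
    -- match: recurse with one element popped from each
    have ht : tcopy.dropLast ++ [tcopy.getLast h.1] = tcopy := List.dropLast_concat_getLast h.1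
    have hf : forked.dropLast ++ [forked.getLast h.2] = forked := List.dropLast_concat_getLast h.2
    have htr : tcopy.reverse = tcopy.getLast h.1 :: tcopy.dropLast.reverse := by
      conv_lhs => rw [← ht]
      simp
    have hfr : forked.reverse = forked.getLast h.2 :: forked.dropLast.reverse := by
      conv_lhs => rw [← hf]
      simp
    have hn : pvCountB tcopy.reverse forked.reverse
        = pvCountB tcopy.dropLast.reverse forked.dropLast.reverse + 1 := by
      rw [htr, hfr]; simp only [pvCountB]; rw [if_neg hne]
    set n' := pvCountB tcopy.dropLast.reverse forked.dropLast.reverse with hn'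
    have hlt : tcopy.length = tcopy.dropLast.length + 1 := by
      rw [← ht]; simp
    have hlf : forked.length = forked.dropLast.length + 1 := by
      rw [← hf]; simp
    have htake_t : tcopy.take (tcopy.length - (n' + 1))
        = tcopy.dropLast.take (tcopy.dropLast.length - n') := by
      conv_lhs => rw [← ht]
      simp only [List.length_append, List.length_cons, List.length_nil]
      rw [List.take_append_of_le_length (by omega)]
      congr 1; omega
    have htake_f : forked.take (forked.length - (n' + 1))
        = forked.dropLast.take (forked.dropLast.length - n') := by
      conv_lhs => rw [← hf]
      simp only [List.length_append, List.length_cons, List.length_nil]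
      rw [List.take_append_of_le_length (by omega)]
      congr 1; omega
    rw [ih, hn, htake_t, htake_f, hfr]
    simp [ef, tcopy', forked', List.take_succ_cons]
  | case3 tcopy forked common h =>
    -- one of the lists is empty: n = 0, nothing happens
    have hn : pvCountB tcopy.reverse forked.reverse = 0 := by
      rcases not_and_or.mp h with h1 | h1 <;> simp only [ne_eq, not_not] at h1 <;> subst h1
      · simp [pvCountB]
      · cases tcopy.reverse <;> simp [pvCountB]
    rw [hn]
    simp

-- ===== VERDICT (by name: the statement is the Claim_ definition above) =====
theorem compare_target_forked_commits_spec : Claim_equal_compare_target_forked_commits := by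
  intro t f _hDom _hPre
  unfold Spec_compare_target_forked_commits
  simp only [compare_target_forked_commits, compare_target_forked_commits_alt, pvLoopA_eq,
    List.nil_append]
  have hnt := pvCountB_le_left t.reverse f.reverse
  have hnf := pvCountB_le_right t.reverse f.reverse
  simp only [List.length_reverse] at hnt hnf
  set n := pvCountB t.reverse f.reverse with hn
  refine Prod.ext ?_ (Prod.ext ?_ ?_)
  · simp [List.length_take]; omega
  · simp [List.length_take]; omega
  · cases hn0 : n with
    | zero =>
      simp [List.take_length]
    | succ k =>
      have hk : k + 1 ≤ f.length := by omega
      have hlen : (f.reverse.take (k + 1)).length = k + 1 := by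
        simp; omega
      have hne0 : ¬ (f.reverse.take (k + 1)).length = 0 := by omega
      simp only [hne0, if_false, if_pos (Nat.succ_ne_zero k)]
      rw [PySem.List.pyGet?_neg_natCast f (k + 1) (Nat.succ_pos k) hk]
      rw [List.getLastD_eq_getLast?, List.getLast?_eq_getElem?, hlen]
      rw [List.getElem?_take_of_lt (by omega), List.getElem?_reverse (by omega)]
      congr 2
      omega
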